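-- pv_equiv track=rewrite | github.com/joonhyukchoi/algorithm | programmers/매출하락최소화.py | solution
-- ===== SOURCE A (Python) =====
-- def solution(sales, links):
--     answer = 0
--     count = len(sales)
--     graph = [[] for _ in range(count + 1)]
--     d = [[1000000, 1000000] for _ in range(count + 1)]
--     sum_child = [0] * (count + 1)
--     for link in links:
--         a, b = link
--         graph[a].append(b)
--     sales.insert(0, 0)
--     def dp(n, index):
--         if d[n][index] != 1000000:
--             return d[n][index]
--         check = False
--         minval = 1000000
--         tempSum = 0
--         if graph[n]:
--             for k in graph[n]:
--                 tempSum += min(dp(k, 0), dp(k, 1))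
--                 if d[k][0] > d[k][1]:
--                     check = True
--                 else:
--                     if minval > d[k][1] - d[k][0]:
--                         minval = d[k][1] - d[k][0]
--             sum_child[n] = tempSum
--         else:
--             d[n][0] = 0
--             d[n][1] = sales[n]
--             return d[n][index]
--         if index == 0:
--             if check:
--                 d[n][0] = sum_child[n]
--             else:
--                 d[n][0] = sum_child[n] + minval
--             return d[n][index]
--
--         elif index == 1:
--             d[n][1] = sales[n] + sum_child[n]
--             return d[n][index]
--     return min(dp(1, 0),dp(1, 1))
-- ===== SOURCE B (Python) =====
-- def solution(sales, links):
--     # Iterative re-implementation: build the children lists, produce a DFS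
--     # order with an explicit stack, then sweep it bottom-up computing the
--     # same (not-kept, kept) table; no recursion, no memo sentinel.
--     count = len(sales)
--     children = [[] for _ in range(count + 1)]
--     for a, b in links:
--         children[a].append(b)
--     sales.insert(0, 0)
--     order = []
--     stack = [1]
--     while stack:
--         n = stack.pop()
--         order.append(n)
--         stack.extend(children[n])
--     d = {}
--     for n in reversed(order):
--         kids = children[n]
--         if not kids:
--             d[n] = (0, sales[n])
--         else:
--             s = sum(min(d[k][0], d[k][1]) for k in kids)
--             if any(d[k][0] > d[k][1] for k in kids):
--                 v0 = s
--             else: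
--                 v0 = s + min([1000000] + [d[k][1] - d[k][0] for k in kids])
--             d[n] = (v0, sales[n] + s)
--     return min(d[1][0], d[1][1])
-- ===== Notes on version B (the rewrite author's own statement) =====
-- stated objective: alternative
-- what changed: A's memoised recursive dp over the tree (mutable d/sum_child tables, sentinel 1000000 memo checks) is replaced by an explicit-stack DFS that produces a visit order and a single bottom-up sweep over the reversed order computing the same two-state table into a dict; Source B keeps the sales.insert(0,0) mutation.
import Mathlib
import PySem

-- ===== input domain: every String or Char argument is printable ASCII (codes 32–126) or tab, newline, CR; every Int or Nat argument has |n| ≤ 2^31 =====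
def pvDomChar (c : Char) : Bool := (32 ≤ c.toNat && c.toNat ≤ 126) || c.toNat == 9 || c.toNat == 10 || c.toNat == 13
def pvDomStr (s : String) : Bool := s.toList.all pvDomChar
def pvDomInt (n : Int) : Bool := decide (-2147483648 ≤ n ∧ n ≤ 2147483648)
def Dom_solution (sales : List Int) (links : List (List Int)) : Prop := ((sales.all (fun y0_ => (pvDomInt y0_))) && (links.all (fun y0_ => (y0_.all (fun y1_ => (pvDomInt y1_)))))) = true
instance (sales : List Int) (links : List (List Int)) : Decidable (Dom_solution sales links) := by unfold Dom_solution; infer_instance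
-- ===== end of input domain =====

-- B replaces A's memoised recursion by an explicit-stack DFS order and a single
-- bottom-up sweep computing the same two-state table (alternative decomposition,
-- no speed claim).  Both A and Source B mutate `sales` (insert 0 at the front) the
-- same way; the equivalence proved here is about the return value.

-- ===== SHARED HELPERS (both Pythons build the same child lists and read
-- `sales`/`d`/`graph` with Python list indexing, which wraps a negative index
-- by the length; pvNorm is that normalisation, exact for indices in
-- [-(N), N-1], the only ones Pre_ admits on reachable nodes) =====
def pvNorm (N : ℕ) (x : Int) : ℕ := (x.emod (N : Int)).toNat

-- `graph = [[] for _ in range(count+1)]; for a, b in links: graph[a].append(b)`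
-- (modelled as a function from the normalised index to the cell, the Python
-- list of lists; a malformed or out-of-range link makes Python raise, which
-- Pre_ excludes, so the skip/wrap here is unreachable inside Pre_).
def pvGraph (N : ℕ) (links : List (List Int)) : ℕ → List Int :=
  links.foldl
    (fun g l =>
      match l with
      | [a, b] => fun m => if m = pvNorm N a then g m ++ [b] else g m
      | _ => g)
    (fun _ => [])

-- `sales.insert(0, 0)` then `sales[n]` (n is a valid index whenever read inside Pre_)
def pvSal (sales : List Int) (n : ℕ) : Int := (0 :: sales).getD n 0

-- ===== PORT A =====
-- d[n][index] selection
def pvPick (idx : ℕ) (p : Int × Int) : Int := if idx = 0 then p.1 else p.2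

-- writing one cell of the Python list `d` (modelled as a function)
def pvUpd (st : ℕ → Int × Int) (n : ℕ) (v : Int × Int) : ℕ → Int × Int :=
  fun m => if m = n then v else st m

-- the recursive `dp(n, index)` with the memo table `d` threaded as state.
-- fuel makes the recursion total; inside Pre_ it never runs out (proved below).
-- `sum_child[n]` is written and immediately read back in A; it is the fold's
-- tempSum here, same value.  The node is normalised once (Python's negative
-- list indexing aliases the same cells).  dp is only ever called with
-- index ∈ {0,1}; idx ≠ 0 is Python's `elif index == 1` branch.
def pvDpA (g : ℕ → List Int) (sal : ℕ → Int) (N : ℕ) :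
    ℕ → ℕ → ℕ → (ℕ → Int × Int) → Int × (ℕ → Int × Int)
  | 0, _, _, st => (0, st)
  | f+1, n, idx, st =>
    let cur := pvPick idx (st n)
    if cur ≠ 1000000 then (cur, st)
    else if g n = [] then
      (pvPick idx (0, sal n), pvUpd st n (0, sal n))
    else
      let r := (g n).foldl
        (fun acc b =>
          let k := pvNorm N b
          let r0 := pvDpA g sal N f k 0 acc.2.2.2
          let r1 := pvDpA g sal N f k 1 r0.2
          let tempSum := acc.1 + min r0.1 r1.1
          let dk := r1.2 k
          if dk.1 > dk.2 then (tempSum, true, acc.2.2.1, r1.2)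
          else (tempSum, acc.2.1,
                if acc.2.2.1 > dk.2 - dk.1 then dk.2 - dk.1 else acc.2.2.1, r1.2))
        ((0 : Int), false, (1000000 : Int), st)
      if idx = 0 then
        let v := if r.2.1 then r.1 else r.1 + r.2.2.1
        (v, pvUpd r.2.2.2 n (v, (r.2.2.2 n).2))
      else
        let v := sal n + r.1
        (v, pvUpd r.2.2.2 n ((r.2.2.2 n).1, v))

def solution (sales : List Int) (links : List (List Int)) : Int :=
  let c := sales.length
  let N := c + 1
  let g := pvGraph N links
  let sal := pvSal sales
  let st0 : ℕ → Int × Int := fun _ => (1000000, 1000000)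
  let r0 := pvDpA g sal N (c + 2) 1 0 st0
  let r1 := pvDpA g sal N (c + 2) 1 1 r0.2
  min r0.1 r1.1

-- ===== PORT B =====
-- `while stack: n = stack.pop(); order.append(n); stack.extend(children[n])`
-- (Python pops from the END; with the stack head-first here, extending by the
-- children and popping the last is pushing the REVERSED child list on the
-- head).  fuel makes the while-loop total; inside Pre_ it never runs out.
def pvLoop (g : ℕ → List Int) (N : ℕ) : ℕ → List Int → List Int → List Int
  | _, [], ord => ord
  | 0, _ :: _, ord => ord
  | f+1, n :: rest, ord => pvLoop g N f ((g (pvNorm N n)).reverse ++ rest) (ord ++ [n])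

-- one step of the bottom-up sweep: `d[n] = …` for one n of reversed(order)
-- (the dict d is modelled as a function Int → Int × Int; inside Pre_ every
-- key read was written earlier in the sweep, so no KeyError is reachable)
def pvUpdI (st : Int → Int × Int) (n : Int) (v : Int × Int) : Int → Int × Int :=
  fun m => if m = n then v else st m

def pvStep (g : ℕ → List Int) (sal : ℕ → Int) (N : ℕ)
    (st : Int → Int × Int) (n : Int) : Int → Int × Int :=
  let nn := pvNorm N n
  let kids := g nn
  if kids = [] then pvUpdI st n (0, sal nn)
  else
    let s := (kids.map (fun k => min (st k).1 (st k).2)).sum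
    let v0 := if kids.any (fun k => decide ((st k).1 > (st k).2)) then s
              else s + (kids.map (fun k => (st k).2 - (st k).1)).foldl min 1000000
    pvUpdI st n (v0, sal nn + s)

def solution_alt (sales : List Int) (links : List (List Int)) : Int :=
  let c := sales.length
  let N := c + 1
  let g := pvGraph N links
  let sal := pvSal sales
  let big := (links.length + 1) ^ (c + 2) + 1
  let order := pvLoop g N big [1] []
  let st := order.reverse.foldl (pvStep g sal N) (fun _ => (0, 0))
  min (st 1).1 (st 1).2

-- ===== PRECONDITION & SPEC =====
-- each link must be a pair [a, b] with a a valid Python index into graph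
def pvShape (N : ℕ) (l : List Int) : Bool :=
  match l with
  | [a, _] => decide (-(N : Int) ≤ a) && decide (a < (N : Int))
  | _ => false

-- pvOk g N f n: a property of the LINK GRAPH alone (it never evaluates sales
-- or any DP value): every chain of child links starting at n consists of valid
-- Python indices and has fewer than f nodes.  With f = count+2 this says
-- exactly that the part of the link graph reachable from node 1 is in range
-- and acyclic — the standard shape condition for a rooted org tree.
def pvOk (g : ℕ → List Int) (N : ℕ) : ℕ → ℕ → Bool
  | 0, _ => false
  | f+1, n => (g n).all
      (fun b => decide (-(N : Int) ≤ b) && decide (b < (N : Int)) && pvOk g N f (pvNorm N b))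

-- Pre_ excludes exactly the inputs where the Python A raises: empty `sales`
-- (IndexError on d[1]), a link that is not an in-range pair (ValueError /
-- IndexError while building graph), and an out-of-range or cyclic link chain
-- reachable from node 1 (IndexError / RecursionError inside dp).
def Pre_solution (sales : List Int) (links : List (List Int)) : Prop :=
  sales ≠ [] ∧
  links.all (pvShape (sales.length + 1)) = true ∧
  pvOk (pvGraph (sales.length + 1) links) (sales.length + 1) (sales.length + 2) 1 = true

instance (sales : List Int) (links : List (List Int)) : Decidable (Pre_solution sales links) := by
  unfold Pre_solution; infer_instance

def pvWitness_solution : List Int × List (List Int) := ([5, 4], [[1, 2]])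

def Spec_solution (sales : List Int) (links : List (List Int)) (out : Int) : Prop := out = solution_alt sales links
instance (sales : List Int) (links : List (List Int)) (out : Int) : Decidable (Spec_solution sales links out) := by unfold Spec_solution; infer_instance

-- ===== CLAIM (what is proved, stated in full; the proofs are below) =====
def Claim_equal_solution : Prop := ∀ (sales : List Int) (links : List (List Int)), Dom_solution sales links → Pre_solution sales links → Spec_solution sales links (solution sales links)

-- ===== LEMMAS AND PROOFS =====

-- the common value of both programs: the pure two-state tree DP, by fuel
def pvVal (g : ℕ → List Int) (sal : ℕ → Int) (N : ℕ) : ℕ → ℕ → Int × Int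
  | 0, _ => (0, 0)
  | f+1, n =>
    if g n = [] then (0, sal n)
    else
      let vals := (g n).map (fun b => pvVal g sal N f (pvNorm N b))
      let s := (vals.map (fun p => min p.1 p.2)).sum
      ((if vals.any (fun p => decide (p.1 > p.2)) then s
        else s + (vals.map (fun p => p.2 - p.1)).foldl min 1000000), sal n + s)

lemma pvOk_children {g : ℕ → List Int} {N f n : ℕ} (h : pvOk g N (f+1) n = true) :
    ∀ b ∈ g n, (-(N : Int) ≤ b ∧ b < (N : Int)) ∧ pvOk g N f (pvNorm N b) = true := by
  intro b hb
  simp only [pvOk, List.all_eq_true] at h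
  have := h b hb
  simp only [Bool.and_eq_true, decide_eq_true_eq] at this
  exact ⟨⟨this.1.1, this.1.2⟩, this.2⟩

lemma pvVal_stable {g : ℕ → List Int} {sal : ℕ → Int} {N : ℕ} :
    ∀ f n, pvOk g N f n = true → ∀ F, f ≤ F → pvVal g sal N F n = pvVal g sal N f n := by
  intro f
  induction f with
  | zero => intro n h; simp [pvOk] at h
  | succ f ih =>
    intro n h F hF
    obtain ⟨F', rfl⟩ : ∃ F', F = F' + 1 := ⟨F - 1, by omega⟩
    by_cases hg : g n = []
    · simp [pvVal, hg]
    · have hch := pvOk_children h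
      simp only [pvVal, hg]
      have : (g n).map (fun b => pvVal g sal N F' (pvNorm N b)) =
             (g n).map (fun b => pvVal g sal N f (pvNorm N b)) := by
        refine List.map_congr_left ?_
        intro b hb
        exact ih (pvNorm N b) (hch b hb).2 F' (by omega)
      rw [this]

lemma pvVal_leaf {g : ℕ → List Int} {sal : ℕ → Int} {N f n : ℕ}
    (hf : 1 ≤ f) (h : g n = []) : pvVal g sal N f n = (0, sal n) := by
  cases f with
  | zero => omega
  | succ f' => simp [pvVal, h]

-- unfolding of the top-fuel value at an ok node, children already at top fuel
lemma pvVal_unfold {g : ℕ → List Int} {sal : ℕ → Int} {N C f n : ℕ}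
    (hok : pvOk g N f n = true) (hfC : f ≤ C) (hne : g n ≠ []) :
    pvVal g sal N C n =
      (let vals := (g n).map (fun b => pvVal g sal N C (pvNorm N b))
       let s := (vals.map (fun p => min p.1 p.2)).sum
       ((if vals.any (fun p => decide (p.1 > p.2)) then s
         else s + (vals.map (fun p => p.2 - p.1)).foldl min 1000000), sal n + s)) := by
  have hf0 : f ≠ 0 := by rintro rfl; simp [pvOk] at hok
  obtain ⟨f', rfl⟩ : ∃ f', f = f' + 1 := ⟨f - 1, by omega⟩
  have hch := pvOk_children hok
  have hstab : ∀ b ∈ g n, pvVal g sal N C (pvNorm N b) = pvVal g sal N f' (pvNorm N b) :=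
    fun b hb => pvVal_stable f' (pvNorm N b) (hch b hb).2 C (by omega)
  have h1 : pvVal g sal N C n = pvVal g sal N (f' + 1) n :=
    pvVal_stable (f' + 1) n hok C hfC
  rw [h1]
  simp only [pvVal, if_neg hne]
  rw [List.map_congr_left (fun b hb => (hstab b hb).symm)]

-- state invariants for A's memo table
def pvGood (V : ℕ → Int × Int) (st : ℕ → Int × Int) : Prop :=
  ∀ m, ((st m).1 = 1000000 ∨ (st m).1 = (V m).1) ∧ ((st m).2 = 1000000 ∨ (st m).2 = (V m).2)

def pvMono (V : ℕ → Int × Int) (st st' : ℕ → Int × Int) : Prop :=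
  ∀ m, ((st' m).1 = (st m).1 ∨ (st' m).1 = (V m).1) ∧ ((st' m).2 = (st m).2 ∨ (st' m).2 = (V m).2)

lemma pvAny_congr {α : Type} {l : List α} {p q : α → Bool} (h : ∀ a ∈ l, p a = q a) :
    l.any p = l.any q := by
  induction l with
  | nil => rfl
  | cons a l ih =>
    simp only [List.any_cons, h a (by simp), ih (fun b hb => h b (by simp [hb]))]

lemma pvMono_rfl {V : ℕ → Int × Int} (st : ℕ → Int × Int) : pvMono V st st := by
  intro m; exact ⟨Or.inl rfl, Or.inl rfl⟩

lemma pvMono_trans {V : ℕ → Int × Int} {s1 s2 s3 : ℕ → Int × Int}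
    (h12 : pvMono V s1 s2) (h23 : pvMono V s2 s3) : pvMono V s1 s3 := by
  intro m
  constructor
  · rcases (h23 m).1 with h | h
    · rw [h]; exact (h12 m).1
    · exact Or.inr h
  · rcases (h23 m).2 with h | h
    · rw [h]; exact (h12 m).2
    · exact Or.inr h

-- the children-loop body of A's dp, named for the proofs (definitionally the
-- fold body inside pvDpA)
def pvBody (g : ℕ → List Int) (sal : ℕ → Int) (N F' : ℕ) :
    (Int × Bool × Int × (ℕ → Int × Int)) → Int → (Int × Bool × Int × (ℕ → Int × Int)) :=
  fun acc b =>
    let k := pvNorm N b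
    let r0 := pvDpA g sal N F' k 0 acc.2.2.2
    let r1 := pvDpA g sal N F' k 1 r0.2
    let tempSum := acc.1 + min r0.1 r1.1
    let dk := r1.2 k
    if dk.1 > dk.2 then (tempSum, true, acc.2.2.1, r1.2)
    else (tempSum, acc.2.1,
          if acc.2.2.1 > dk.2 - dk.1 then dk.2 - dk.1 else acc.2.2.1, r1.2)

-- A's dp computes the pure DP and keeps the memo table good
lemma pvDpA_ok {g : ℕ → List Int} {sal : ℕ → Int} {N C : ℕ} :
    ∀ f, f ≤ C → ∀ F, f ≤ F → ∀ n idx st, pvOk g N f n = true →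
      pvGood (pvVal g sal N C) st →
      (pvDpA g sal N F n idx st).1 = pvPick idx (pvVal g sal N C n) ∧
      pvGood (pvVal g sal N C) (pvDpA g sal N F n idx st).2 ∧
      pvPick idx ((pvDpA g sal N F n idx st).2 n) = pvPick idx (pvVal g sal N C n) ∧
      pvMono (pvVal g sal N C) st (pvDpA g sal N F n idx st).2 := by
  intro f
  induction f with
  | zero => intro _ F _ n idx st hok; simp [pvOk] at hok
  | succ f ih =>
    intro hfC F hF n idx st hok hst
    set V := pvVal g sal N C with hV
    obtain ⟨F', rfl⟩ : ∃ F', F = F' + 1 := ⟨F - 1, by omega⟩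
    by_cases hcur : pvPick idx (st n) = 1000000
    · -- memo miss: compute
      by_cases hg : g n = []
      · -- leaf
        have hVn : V n = (0, sal n) := pvVal_leaf (by omega) hg
        have e : pvDpA g sal N (F' + 1) n idx st =
            (pvPick idx (0, sal n), pvUpd st n (0, sal n)) := by
          simp [pvDpA, hcur, hg]
        rw [e]
        refine ⟨by rw [hVn], ?_, ?_, ?_⟩
        · intro m
          by_cases hmn : m = n
          · subst hmn; simp [pvUpd, hVn]
          · simp only [pvUpd, if_neg hmn]; exact hst m
        · simp [pvUpd, hVn]
        · intro m
          by_cases hmn : m = n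
          · subst hmn; simp [pvUpd, hVn]
          · simp [pvUpd, hmn]
      · -- internal node: characterise the children fold
        have hch := pvOk_children hok
        have fold_spec : ∀ (ks : List Int), (∀ b ∈ ks, pvOk g N f (pvNorm N b) = true) →
            ∀ (ts : Int) (ck : Bool) (mv : Int) (st0 : ℕ → Int × Int), pvGood V st0 →
            (ks.foldl (pvBody g sal N F') (ts, ck, mv, st0)).1 =
              ts + ((ks.map (fun b => V (pvNorm N b))).map (fun p => min p.1 p.2)).sum ∧
            (ks.foldl (pvBody g sal N F') (ts, ck, mv, st0)).2.1 =
              (ck || (ks.map (fun b => V (pvNorm N b))).any (fun p => decide (p.1 > p.2))) ∧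
            ((ks.map (fun b => V (pvNorm N b))).any (fun p => decide (p.1 > p.2)) = false →
              (ks.foldl (pvBody g sal N F') (ts, ck, mv, st0)).2.2.1 =
                ((ks.map (fun b => V (pvNorm N b))).map (fun p => p.2 - p.1)).foldl min mv) ∧
            pvGood V (ks.foldl (pvBody g sal N F') (ts, ck, mv, st0)).2.2.2 ∧
            pvMono V st0 (ks.foldl (pvBody g sal N F') (ts, ck, mv, st0)).2.2.2 := by
          intro ks
          induction ks with
          | nil =>
            intro _ ts ck mv st0 hst0
            exact ⟨by simp, by simp, fun _ => by simp, hst0, pvMono_rfl st0⟩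
          | cons b ks ihk =>
            intro hall ts ck mv st0 hst0
            have hokb := hall b (by simp)
            obtain ⟨e01, e02, e03, e04⟩ :=
              ih (by omega) F' (by omega) (pvNorm N b) 0 st0 hokb hst0
            obtain ⟨e11, e12, e13, e14⟩ :=
              ih (by omega) F' (by omega) (pvNorm N b) 1
                (pvDpA g sal N F' (pvNorm N b) 0 st0).2 hokb e02
            set r0 := pvDpA g sal N F' (pvNorm N b) 0 st0 with hr0
            set r1 := pvDpA g sal N F' (pvNorm N b) 1 r0.2 with hr1
            have hdk1 : (r1.2 (pvNorm N b)).1 = (V (pvNorm N b)).1 := by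
              rcases (e14 (pvNorm N b)).1 with h2 | h2
              · rw [h2]; simpa [pvPick] using e03
              · exact h2
            have hdk2 : (r1.2 (pvNorm N b)).2 = (V (pvNorm N b)).2 := by
              simpa [pvPick] using e13
            have hv0 : r0.1 = (V (pvNorm N b)).1 := by simpa [pvPick] using e01
            have hv1 : r1.1 = (V (pvNorm N b)).2 := by simpa [pvPick] using e11
            simp only [List.foldl_cons]
            have hbody :
                pvBody g sal N F' (ts, ck, mv, st0) b =
                (if (V (pvNorm N b)).1 > (V (pvNorm N b)).2 then
                  (ts + min (V (pvNorm N b)).1 (V (pvNorm N b)).2, true, mv, r1.2)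
                 else (ts + min (V (pvNorm N b)).1 (V (pvNorm N b)).2, ck,
                       if mv > (V (pvNorm N b)).2 - (V (pvNorm N b)).1 then
                         (V (pvNorm N b)).2 - (V (pvNorm N b)).1 else mv, r1.2)) := by
              simp only [pvBody, ← hr0, ← hr1, hdk1, hdk2, hv0, hv1]
            rw [hbody]
            by_cases hgt : (V (pvNorm N b)).1 > (V (pvNorm N b)).2
            · rw [if_pos hgt]
              obtain ⟨c1, c2, c3, c4, c5⟩ :=
                ihk (fun x hx => hall x (by simp [hx]))
                  (ts + min (V (pvNorm N b)).1 (V (pvNorm N b)).2) true mv r1.2 e12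
              refine ⟨?_, ?_, ?_, c4, ?_⟩
              · rw [c1]; simp; ring
              · rw [c2]; simp [hgt]
              · intro hanyall
                simp [hgt] at hanyall
              · exact pvMono_trans (pvMono_trans e04 e14) c5
            · rw [if_neg hgt]
              obtain ⟨c1, c2, c3, c4, c5⟩ :=
                ihk (fun x hx => hall x (by simp [hx]))
                  (ts + min (V (pvNorm N b)).1 (V (pvNorm N b)).2) ck
                  (if mv > (V (pvNorm N b)).2 - (V (pvNorm N b)).1 then
                    (V (pvNorm N b)).2 - (V (pvNorm N b)).1 else mv) r1.2 e12
              refine ⟨?_, ?_, ?_, c4, ?_⟩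
              · rw [c1]; simp; ring
              · rw [c2]; simp [hgt]
              · intro hanyall
                simp only [List.map_cons, List.any_cons, Bool.or_eq_false_iff] at hanyall
                rw [c3 hanyall.2]
                simp only [List.map_cons, List.foldl_cons]
                congr 1
                rw [min_def]
                split_ifs <;> omega
              · exact pvMono_trans (pvMono_trans e04 e14) c5
        obtain ⟨c1, c2, c3, c4, c5⟩ :=
          fold_spec (g n) (fun b hb => (hch b hb).2) 0 false 1000000 st hst
        have hVn := pvVal_unfold (g := g) (sal := sal) hok hfC hg
        rw [← hV] at hVn
        set r := (g n).foldl (pvBody g sal N F') ((0 : Int), false, (1000000 : Int), st) with hr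
        have hS : r.1 = ((((g n).map (fun b => V (pvNorm N b))).map (fun p => min p.1 p.2)).sum : Int) := by
          rw [c1]; ring
        have hCk : r.2.1 = ((g n).map (fun b => V (pvNorm N b))).any (fun p => decide (p.1 > p.2)) := by
          rw [c2]; simp
        have hval : (if r.2.1 then r.1 else r.1 + r.2.2.1) = (V n).1 := by
          rw [hVn]
          by_cases hany : ((g n).map (fun b => V (pvNorm N b))).any (fun p => decide (p.1 > p.2)) = true
          · simp only [hCk, hany, if_pos, hS]
          · have hany' : ((g n).map (fun b => V (pvNorm N b))).any (fun p => decide (p.1 > p.2)) = false := by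
              simpa using hany
            simp only [hCk, hany', hS, c3 hany']
        have hval2 : sal n + r.1 = (V n).2 := by
          rw [hVn, hS]
        have e : pvDpA g sal N (F' + 1) n idx st =
            (if idx = 0 then
              (if r.2.1 then r.1 else r.1 + r.2.2.1,
               pvUpd r.2.2.2 n (if r.2.1 then r.1 else r.1 + r.2.2.1, (r.2.2.2 n).2))
             else (sal n + r.1, pvUpd r.2.2.2 n ((r.2.2.2 n).1, sal n + r.1))) := by
          simp only [pvDpA, hcur, hg]
          rw [show (fun (acc : Int × Bool × Int × (ℕ → Int × Int)) (b : Int) =>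
                let k := pvNorm N b
                let r0 := pvDpA g sal N F' k 0 acc.2.2.2
                let r1 := pvDpA g sal N F' k 1 r0.2
                let tempSum := acc.1 + min r0.1 r1.1
                let dk := r1.2 k
                if dk.1 > dk.2 then (tempSum, true, acc.2.2.1, r1.2)
                else (tempSum, acc.2.1,
                      if acc.2.2.1 > dk.2 - dk.1 then dk.2 - dk.1 else acc.2.2.1, r1.2)) =
              pvBody g sal N F' from rfl, ← hr]
          simp
        rw [e]
        by_cases hidx : idx = 0
        · subst hidx
          rw [if_pos rfl]
          refine ⟨by simpa [pvPick] using hval, ?_, by simpa [pvUpd, pvPick] using hval, ?_⟩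
          · intro m
            by_cases hmn : m = n
            · subst hmn
              constructor
              · right; simpa [pvUpd] using hval
              · simp [pvUpd]; exact (c4 m).2
            · simp only [pvUpd, if_neg hmn]; exact c4 m
          · intro m
            by_cases hmn : m = n
            · subst hmn
              constructor
              · right; simpa [pvUpd] using hval
              · simp only [pvUpd, if_pos]
                rcases (c5 m).2 with h2 | h2
                · rw [← h2]; exact Or.inl rfl
                · right; exact h2
            · simp only [pvUpd, if_neg hmn]; exact c5 m
        · rw [if_neg hidx]
          refine ⟨by simpa [pvPick, hidx] using hval2, ?_, by simpa [pvUpd, pvPick, hidx] using hval2, ?_⟩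
          · intro m
            by_cases hmn : m = n
            · subst hmn
              constructor
              · simp [pvUpd]; exact (c4 m).1
              · right; simpa [pvUpd] using hval2
            · simp only [pvUpd, if_neg hmn]; exact c4 m
          · intro m
            by_cases hmn : m = n
            · subst hmn
              constructor
              · simp only [pvUpd, if_pos]
                rcases (c5 m).1 with h2 | h2
                · rw [← h2]; exact Or.inl rfl
                · right; exact h2
              · right; simpa [pvUpd] using hval2
            · simp only [pvUpd, if_neg hmn]; exact c5 m
    · -- memo hit: return the cached value, state unchanged
      have hpick : pvPick idx (st n) = pvPick idx (V n) := by
        rcases Nat.eq_zero_or_pos idx with h0 | h0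
        · subst h0
          rcases (hst n).1 with h2 | h2
          · exact absurd (by simpa [pvPick] using h2) (by simpa [pvPick] using hcur)
          · simpa [pvPick] using h2
        · have hne : idx ≠ 0 := by omega
          rcases (hst n).2 with h2 | h2
          · exact absurd (by simpa [pvPick, hne] using h2) (by simpa [pvPick, hne] using hcur)
          · simpa [pvPick, hne] using h2
      have e : pvDpA g sal N (F' + 1) n idx st = (pvPick idx (st n), st) := by
        simp [pvDpA, hcur]
      rw [e]
      exact ⟨hpick, hst, hpick, pvMono_rfl st⟩

-- ===== B-side proof machinery =====

-- the DFS output of B's while-loop, tree-structured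
def pvDfs (g : ℕ → List Int) (N : ℕ) : ℕ → Int → List Int
  | 0, n => [n]
  | f+1, n => n :: ((g (pvNorm N n)).reverse.map (pvDfs g N f)).flatten

lemma pvLoop_nil (g : ℕ → List Int) (N : ℕ) (F : ℕ) (ord : List Int) :
    pvLoop g N F [] ord = ord := by cases F <;> rfl

lemma pvLoop_dfs {g : ℕ → List Int} {N : ℕ} :
    ∀ f (n : Int), pvOk g N f (pvNorm N n) = true →
      ∀ F rest ord,
        pvLoop g N ((pvDfs g N f n).length + F) (n :: rest) ord =
        pvLoop g N F rest (ord ++ pvDfs g N f n) := by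
  intro f
  induction f with
  | zero => intro n h; simp [pvOk] at h
  | succ f ih =>
    intro n h F rest ord
    have hch := pvOk_children h
    have inner : ∀ (ks : List Int), (∀ b ∈ ks, pvOk g N f (pvNorm N b) = true) →
        ∀ (F : ℕ) (rest ord : List Int),
        pvLoop g N ((ks.map (pvDfs g N f)).flatten.length + F) (ks ++ rest) ord =
        pvLoop g N F rest (ord ++ (ks.map (pvDfs g N f)).flatten) := by
      intro ks
      induction ks with
      | nil => intro _ F rest ord; simp
      | cons k ks ihk =>
        intro hall F rest ord
        simp only [List.map_cons, List.flatten_cons, List.length_append, List.cons_append]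
        have e1 : (pvDfs g N f k).length + (ks.map (pvDfs g N f)).flatten.length + F =
            (pvDfs g N f k).length + ((ks.map (pvDfs g N f)).flatten.length + F) := by omega
        rw [e1, ih k (hall k (by simp)) _ (ks ++ rest) ord,
            ihk (fun b hb => hall b (by simp [hb])) F rest (ord ++ pvDfs g N f k),
            List.append_assoc]
    have hlen : (pvDfs g N (f+1) n).length =
        ((g (pvNorm N n)).reverse.map (pvDfs g N f)).flatten.length + 1 := by
      simp [pvDfs]
    rw [hlen]
    have e2 : ((g (pvNorm N n)).reverse.map (pvDfs g N f)).flatten.length + 1 + F =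
        (((g (pvNorm N n)).reverse.map (pvDfs g N f)).flatten.length + F) + 1 := by omega
    rw [e2]
    show pvLoop g N _ (n :: rest) ord = _
    rw [pvLoop]
    rw [inner _ (fun b hb => (hch b (List.mem_reverse.mp hb)).2) F rest (ord ++ [n])]
    have : ord ++ pvDfs g N (f+1) n =
        (ord ++ [n]) ++ ((g (pvNorm N n)).reverse.map (pvDfs g N f)).flatten := by
      simp [pvDfs]
    rw [this]

lemma pvGraph_len (N : ℕ) (links : List (List Int)) (m : ℕ) :
    (pvGraph N links m).length ≤ links.length := by
  suffices h : ∀ (g0 : ℕ → List Int),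
      ((links.foldl (fun g l =>
        match l with
        | [a, b] => fun m => if m = pvNorm N a then g m ++ [b] else g m
        | _ => g) g0) m).length ≤ (g0 m).length + links.length by
    simpa [pvGraph] using h (fun _ => [])
  induction links with
  | nil => intro g0; simp
  | cons l ls ih =>
    intro g0
    simp only [List.foldl_cons, List.length_cons]
    refine le_trans (ih _) ?_
    match l with
    | [] => simp
    | [_] => simp
    | [a, b] =>
      by_cases hm : m = pvNorm N a
      · simp [hm]; omega
      · simp [hm]
    | _ :: _ :: _ :: _ => simp

lemma pvDfs_len {g : ℕ → List Int} {N E : ℕ} (hE : ∀ m, (g m).length ≤ E) :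
    ∀ f (n : Int), (pvDfs g N f n).length ≤ (E + 1) ^ f := by
  intro f
  induction f with
  | zero => intro n; simp [pvDfs]
  | succ f ih =>
    intro n
    simp only [pvDfs, List.length_cons, List.length_flatten, List.map_map]
    have hsum : ((g (pvNorm N n)).reverse.map (fun b => (pvDfs g N f b).length)).sum ≤
        (g (pvNorm N n)).reverse.length * (E + 1) ^ f := by
      calc ((g (pvNorm N n)).reverse.map (fun b => (pvDfs g N f b).length)).sum
          ≤ ((g (pvNorm N n)).reverse.map (fun _ => (E + 1) ^ f)).sum := by
            apply List.sum_le_sum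
            intro b hb
            exact ih b
        _ = (g (pvNorm N n)).reverse.length * (E + 1) ^ f := by
            simp [List.map_const']
    have hlen : (g (pvNorm N n)).reverse.length ≤ E := by
      simpa using hE (pvNorm N n)
    have hpow : 1 ≤ (E + 1) ^ f := Nat.one_le_pow _ _ (by omega)
    have h1 : ((g (pvNorm N n)).reverse.map (List.length ∘ pvDfs g N f)).sum =
        ((g (pvNorm N n)).reverse.map (fun b => (pvDfs g N f b).length)).sum := rfl
    rw [h1]
    have h2 := le_trans hsum (Nat.mul_le_mul_right _ hlen)
    have h3 : E * (E + 1) ^ f + 1 ≤ (E + 1) ^ (f + 1) := by rw [pow_succ]; nlinarith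
    omega


-- sweeping the reversed DFS list writes the pure DP value at every visited key
lemma pvSweep_ok {g : ℕ → List Int} {sal : ℕ → Int} {N C : ℕ} :
    ∀ f (n : Int), pvOk g N f (pvNorm N n) = true → f ≤ C →
      ∀ st : Int → Int × Int,
        (∀ m, ((pvDfs g N f n).reverse.foldl (pvStep g sal N) st) m = st m ∨
              ((pvDfs g N f n).reverse.foldl (pvStep g sal N) st) m = pvVal g sal N C (pvNorm N m)) ∧
        ((pvDfs g N f n).reverse.foldl (pvStep g sal N) st) n = pvVal g sal N C (pvNorm N n) := by
  intro f
  induction f with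
  | zero => intro n h; simp [pvOk] at h
  | succ f ih =>
    intro n h hfC st
    have hch := pvOk_children h
    have hrev : (pvDfs g N (f+1) n).reverse =
        ((g (pvNorm N n)).map (fun k => (pvDfs g N f k).reverse)).flatten ++ [n] := by
      simp only [pvDfs, List.reverse_cons, List.reverse_flatten, List.map_map,
        List.map_reverse, List.reverse_reverse]
      rfl
    rw [hrev, List.foldl_append]
    simp only [List.foldl_cons, List.foldl_nil]
    set W : Int → Int × Int := fun m => pvVal g sal N C (pvNorm N m) with hW
    have inner : ∀ (ks : List Int), (∀ b ∈ ks, pvOk g N f (pvNorm N b) = true) →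
        ∀ st : Int → Int × Int,
          (∀ m, ((ks.map (fun k => (pvDfs g N f k).reverse)).flatten.foldl (pvStep g sal N) st) m = st m ∨
                ((ks.map (fun k => (pvDfs g N f k).reverse)).flatten.foldl (pvStep g sal N) st) m = W m) ∧
          (∀ k ∈ ks, ((ks.map (fun k => (pvDfs g N f k).reverse)).flatten.foldl (pvStep g sal N) st) k = W k) := by
      intro ks
      induction ks with
      | nil => intro _ st; exact ⟨fun m => Or.inl rfl, by simp⟩
      | cons k ks ihk =>
        intro hall st
        simp only [List.map_cons, List.flatten_cons, List.foldl_append]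
        obtain ⟨hm1, hv1⟩ := ih k (hall k (by simp)) (by omega) st
        obtain ⟨hm2, hv2⟩ := ihk (fun b hb => hall b (by simp [hb]))
          ((pvDfs g N f k).reverse.foldl (pvStep g sal N) st)
        refine ⟨fun m => ?_, fun k' hk' => ?_⟩
        · rcases hm2 m with h2 | h2
          · rw [h2]; exact hm1 m
          · exact Or.inr h2
        · rcases List.mem_cons.mp hk' with rfl | hk''
          · rcases hm2 k' with h2 | h2
            · rw [h2]; exact hv1
            · exact h2
          · exact hv2 k' hk''
    obtain ⟨hm, hv⟩ := inner (g (pvNorm N n)) (fun b hb => (hch b hb).2) st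
    set st2 := ((g (pvNorm N n)).map (fun k => (pvDfs g N f k).reverse)).flatten.foldl (pvStep g sal N) st with hst2
    by_cases hg : g (pvNorm N n) = []
    · -- leaf: the sweep writes (0, sales[n])
      have hVn : pvVal g sal N C (pvNorm N n) = (0, sal (pvNorm N n)) :=
        pvVal_leaf (by omega) hg
      constructor
      · intro m
        by_cases hmn : m = n
        · subst hmn
          right
          simp [pvStep, hg, pvUpdI, hVn]
        · rcases hm m with h2 | h2
          · left; simpa [pvStep, hg, pvUpdI, hmn] using h2
          · right; simpa [pvStep, hg, pvUpdI, hmn] using h2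
      · simp [pvStep, hg, pvUpdI, hVn]
    · -- internal: the sweep step recomputes the pure DP combination
      have hkvals : ∀ k ∈ g (pvNorm N n), st2 k = W k := hv
      have hmap1 : (g (pvNorm N n)).map (fun k => min (st2 k).1 (st2 k).2) =
          ((g (pvNorm N n)).map (fun b => pvVal g sal N C (pvNorm N b))).map (fun p => min p.1 p.2) := by
        rw [List.map_map]
        refine List.map_congr_left ?_
        intro k hk'
        simp only [Function.comp_apply, hkvals k hk', hW]
      have hmap3 : (g (pvNorm N n)).map (fun k => (st2 k).2 - (st2 k).1) =
          ((g (pvNorm N n)).map (fun b => pvVal g sal N C (pvNorm N b))).map (fun p => p.2 - p.1) := by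
        rw [List.map_map]
        refine List.map_congr_left ?_
        intro k hk'
        simp only [Function.comp_apply, hkvals k hk', hW]
      have hany : (g (pvNorm N n)).any (fun k => decide ((st2 k).1 > (st2 k).2)) =
          ((g (pvNorm N n)).map (fun b => pvVal g sal N C (pvNorm N b))).any (fun p => decide (p.1 > p.2)) := by
        rw [List.any_map]
        refine pvAny_congr ?_
        intro k hk'
        simp only [Function.comp_apply, hkvals k hk', hW]
      have hVn := pvVal_unfold (g := g) (sal := sal) h hfC hg
      have hpair : pvStep g sal N st2 n n = pvVal g sal N C (pvNorm N n) := by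
        simp only [pvStep, if_neg hg, pvUpdI]
        rw [hmap1, hmap3, hany, hVn]
        simp
      constructor
      · intro m
        by_cases hmn : m = n
        · subst hmn; right; exact hpair
        · have : pvStep g sal N st2 n m = st2 m := by
            simp [pvStep, if_neg hg, pvUpdI, hmn]
          rw [this]; exact hm m
      · exact hpair

-- ===== VERDICT (by name: the statement is the Claim_ definition above) =====
theorem solution_spec : Claim_equal_solution := by
  intro sales links _ hpre
  obtain ⟨hne, _, hok⟩ := hpre
  show solution sales links = solution_alt sales links
  have hc1 : 1 ≤ sales.length := by
    cases sales with
    | nil => exact absurd rfl hne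
    | cons a l => simp
  set c := sales.length with hc
  set N := c + 1 with hN
  set g := pvGraph N links with hg
  set sal := pvSal sales with hsal
  set V := pvVal g sal N (c + 2) with hV
  -- the A side computes min (V 1).1 (V 1).2
  have hgood0 : pvGood V (fun _ => (1000000, 1000000)) := by
    intro m; exact ⟨Or.inl rfl, Or.inl rfl⟩
  obtain ⟨a1, a2, _, _⟩ :=
    pvDpA_ok (g := g) (sal := sal) (N := N) (C := c + 2) (c + 2) le_rfl (c + 2) le_rfl
      1 0 (fun _ => (1000000, 1000000)) hok hgood0
  obtain ⟨b1, _, _, _⟩ :=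
    pvDpA_ok (g := g) (sal := sal) (N := N) (C := c + 2) (c + 2) le_rfl (c + 2) le_rfl
      1 1 (pvDpA g sal N (c + 2) 1 0 (fun _ => (1000000, 1000000))).2 hok a2
  have hA : solution sales links = min (V 1).1 (V 1).2 := by
    simp only [solution, ← hc, ← hN, ← hg, ← hsal]
    rw [a1, b1]
    simp [pvPick, ← hV]
  -- the B side computes the same
  have hn1 : pvNorm N (1 : Int) = 1 := by
    have h2 : (1 : Int).emod (N : Int) = 1 := Int.emod_eq_of_lt (by omega) (by omega)
    unfold pvNorm
    rw [h2]
    rfl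
  have hok1 : pvOk g N (c + 2) (pvNorm N (1 : Int)) = true := by rw [hn1]; exact hok
  have hlenbound := pvDfs_len (g := g) (N := N) (E := links.length)
    (fun m => pvGraph_len N links m) (c + 2) (1 : Int)
  have hbig : (pvDfs g N (c + 2) (1 : Int)).length ≤ (links.length + 1) ^ (c + 2) :=
    hlenbound
  have horder : pvLoop g N ((links.length + 1) ^ (c + 2) + 1) [1] [] =
      pvDfs g N (c + 2) (1 : Int) := by
    have h := pvLoop_dfs (g := g) (N := N) (c + 2) (1 : Int) hok1
      ((links.length + 1) ^ (c + 2) + 1 - (pvDfs g N (c + 2) (1 : Int)).length) [] []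
    rw [show (pvDfs g N (c + 2) (1 : Int)).length +
        ((links.length + 1) ^ (c + 2) + 1 - (pvDfs g N (c + 2) (1 : Int)).length) =
        (links.length + 1) ^ (c + 2) + 1 by omega] at h
    rw [h, pvLoop_nil, List.nil_append]
  obtain ⟨_, hsw⟩ := pvSweep_ok (g := g) (sal := sal) (N := N) (C := c + 2)
    (c + 2) (1 : Int) hok1 le_rfl (fun _ => (0, 0))
  have hB : solution_alt sales links = min (V 1).1 (V 1).2 := by
    simp only [solution_alt, ← hc, ← hN, ← hg, ← hsal]
    rw [horder, hsw, hn1]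
  rw [hA, hB]
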